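-- pv_equiv track=rewrite | github.com/imaspen/AoC-2018-Python | src/solutions/five.py | part_two
-- ===== SOURCE A (Python) =====
-- def part_one(polymer):
--     i = 0
--     while i + 1 < len(polymer):
--         if polymer[i].upper() == polymer[i + 1].upper() and polymer[i] != polymer[i + 1]:
--             polymer = polymer.replace(polymer[i] + polymer[i + 1], "", 1)
--             i -= 1
--             if i < 0:
--                 i = 0
--             continue
--         i += 1
--     return len(polymer)
--
-- def part_two(polymer):
--     min_len = len(polymer)
--     for c in range(ord('a'), ord('z')):
--         char = chr(c)
--         length = part_one(polymer.replace(char, "").replace(char.upper(), ""))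
--         if length < min_len:
--             min_len = length
--     return min_len
-- ===== SOURCE B (Python) =====
-- def part_two(polymer):
--     def react_len(units):
--         stack = []
--         for ch in units:
--             if stack and ch != stack[-1] and ch.upper() == stack[-1].upper():
--                 stack.pop()
--             else:
--                 stack.append(ch)
--         return len(stack)
--
--     best = len(polymer)
--     for c in "abcdefghijklmnopqrstuvwxy":  # same a..y range as the original
--         best = min(best, react_len([ch for ch in polymer if ch != c and ch != c.upper()]))
--     return best
-- ===== Notes on version B (the rewrite author's own statement) =====
-- stated objective: faster
-- what changed: Replaces the rescan-and-str.replace reaction loop with the classic single-pass stack reaction per removed unit type (keeping A's a..y range quirk), so each candidate polymer is reacted in one linear pass.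
import Mathlib
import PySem

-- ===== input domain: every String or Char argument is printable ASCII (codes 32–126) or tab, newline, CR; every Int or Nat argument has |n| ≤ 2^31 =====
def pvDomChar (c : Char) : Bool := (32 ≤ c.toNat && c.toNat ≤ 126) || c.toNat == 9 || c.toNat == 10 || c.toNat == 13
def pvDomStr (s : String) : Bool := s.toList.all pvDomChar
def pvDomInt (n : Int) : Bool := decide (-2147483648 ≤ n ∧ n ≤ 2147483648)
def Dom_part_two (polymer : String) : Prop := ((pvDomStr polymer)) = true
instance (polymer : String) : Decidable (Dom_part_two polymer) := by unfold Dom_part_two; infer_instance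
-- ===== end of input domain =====

-- B replaces A's rescan-and-str.replace reaction loop by a single-pass stack reaction per
-- removed unit type (keeping A's a..y letter range), a structurally different algorithm.

-- ===== PORT A =====

-- Hand port of Python's `s.replace(sub, "", 1)` (PySem.Chars.replace has no count argument):
-- removes the first (leftmost) occurrence of `sub`; exact for nonempty `sub`
-- (A only ever calls it with a 2-character sub).

def replace1 (sub : List Char) : List Char → List Char
  | [] => []
  | a :: t => if sub.isPrefixOf (a :: t) then (a :: t).drop sub.length else a :: replace1 sub t

-- the next two lemmas are cited by partOneLoop's decreasing_by

theorem drop_decomp (s : List Char) (i : Nat) (h : i + 1 < s.length) :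
    s.drop i = s.getD i ' ' :: s.getD (i + 1) ' ' :: s.drop (i + 2) := by
  have h1 : i < s.length := by omega
  have e1 : s.getD i ' ' :: s.drop (i + 1) = s.drop i := by
    rw [List.getD_eq_getElem s ' ' h1]; exact List.getElem_cons_drop h1
  have e2 : s.getD (i + 1) ' ' :: s.drop (i + 2) = s.drop (i + 1) := by
    rw [List.getD_eq_getElem s ' ' h]; exact List.getElem_cons_drop h
  rw [← e1, ← e2]

theorem replace1_length_lt (sub : List Char) (hs : sub ≠ []) :
    ∀ (s : List Char) (j : Nat), sub <+: s.drop j → j < s.length →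
      (replace1 sub s).length < s.length := by
  intro s
  induction s with
  | nil => intro j _ hj; simp at hj
  | cons a t ih =>
    intro j hp hj
    by_cases hpre : sub.isPrefixOf (a :: t)
    · simp only [replace1, hpre, if_pos]
      have : sub.length ≤ (a :: t).length := (List.isPrefixOf_iff_prefix.mp hpre).length_le
      have hpos : 0 < sub.length := List.length_pos_iff.mpr hs
      simp only [List.length_drop]
      omega
    · simp only [replace1, hpre, if_neg, Bool.false_eq_true, not_false_iff, List.length_cons]
      cases j with
      | zero =>
        exact absurd (List.isPrefixOf_iff_prefix.mpr (by simpa using hp)) hpre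
      | succ j' =>
        have := ih j' (by simpa using hp) (by simpa using Nat.lt_of_succ_lt_succ (by simpa using hj))
        omega

-- The scanning reaction loop of A's part_one; `i - 1` on Nat realises Python's
-- `i -= 1; if i < 0: i = 0` clamp exactly; the indices read are always in range,
-- so getD's default is never used.

def partOneLoop (s : List Char) (i : Nat) : Nat :=
  if h : i + 1 < s.length then
    if PySem.Chars.upperChar (s.getD i ' ') == PySem.Chars.upperChar (s.getD (i + 1) ' ')
        && s.getD i ' ' != s.getD (i + 1) ' ' then
      partOneLoop (replace1 [s.getD i ' ', s.getD (i + 1) ' '] s) (i - 1)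
    else
      partOneLoop s (i + 1)
  else
    s.length
termination_by (s.length, s.length - i)
decreasing_by
  · apply Prod.Lex.left
    apply replace1_length_lt _ (by simp) s i
    · exact ⟨s.drop (i + 2), (drop_decomp s i h).symm⟩
    · omega
  · apply Prod.Lex.right
    omega

def part_one (polymer : String) : Int := (partOneLoop polymer.toList 0 : Int)

def part_two (polymer : String) : Int :=
  -- range(ord('a'), ord('z')) = pyRange 97 122; chr(c) is exact here since 97 <= c <= 121
  (PySem.List.pyRange 97 122 1).foldl
    (fun min_len c =>
      let char : String := String.ofList [Char.ofNat c.toNat]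
      let length := part_one
        (PySem.Str.replace (PySem.Str.replace polymer char "") (PySem.Str.upper char) "")
      if length < min_len then length else min_len)
    ((PySem.Str.len polymer : Int))

-- ===== PORT B =====

-- one step of the stack reaction: the incoming unit against the top of the stack

def reactStep (stack : List Char) (ch : Char) : List Char :=
  match stack with
  | top :: rest =>
    if ch != top && PySem.Chars.upperChar ch == PySem.Chars.upperChar top then rest
    else ch :: top :: rest
  | [] => [ch]

def reactLen (units : List Char) : Nat := (units.foldl reactStep []).length

def part_two_alt (polymer : String) : Int :=
  "abcdefghijklmnopqrstuvwxy".toList.foldl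
    (fun best c =>
      min best
        (reactLen (polymer.toList.filter
          (fun ch => ch != c && ch != PySem.Chars.upperChar c)) : Int))
    ((PySem.Str.len polymer : Int))

-- ===== PRECONDITION & SPEC =====
def Spec_part_two (polymer : String) (out : Int) : Prop := out = part_two_alt polymer
instance (polymer : String) (out : Int) : Decidable (Spec_part_two polymer out) := by unfold Spec_part_two; infer_instance

-- ===== CLAIM (what is proved, stated in full; the proofs are below) =====
def Claim_equal_part_two : Prop := ∀ (polymer : String), Dom_part_two polymer → Spec_part_two polymer (part_two polymer)

-- ===== LEMMAS AND PROOFS =====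

-- two units annihilate: same letter, opposite polarity
def Reacts (a b : Char) : Prop :=
  PySem.Chars.upperChar a = PySem.Chars.upperChar b ∧ a ≠ b

theorem reacts_symm {a b : Char} (h : Reacts a b) : Reacts b a :=
  ⟨h.1.symm, h.2.symm⟩

theorem upperChar_toNat (c : Char) :
    (PySem.Chars.upperChar c).toNat =
      if 97 ≤ c.toNat ∧ c.toNat ≤ 122 then c.toNat - 32 else c.toNat := by
  have hle : ∀ a b : Char, (a ≤ b) ↔ (a.toNat ≤ b.toNat) := fun a b => by
    rw [Char.le_def]; exact UInt32.le_iff_toNat_le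
  have ha : 'a'.toNat = 97 := rfl
  have hz : 'z'.toNat = 122 := rfl
  unfold PySem.Chars.upperChar PySem.Chars.islower
  by_cases h1 : (97 : Nat) ≤ c.toNat
  · by_cases h2 : c.toNat ≤ 122
    · rw [if_pos, if_pos ⟨h1, h2⟩, Char.toNat_ofNat, if_pos (Or.inl (by omega))]
      simp only [Bool.and_eq_true, decide_eq_true_eq, hle, ha, hz]
      exact ⟨h1, h2⟩
    · rw [if_neg, if_neg (by omega)]
      simp only [Bool.and_eq_true, decide_eq_true_eq, hle, ha, hz]
      omega
  · rw [if_neg, if_neg (by omega)]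
    simp only [Bool.and_eq_true, decide_eq_true_eq, hle, ha, hz]
    omega

theorem char_eq_iff_toNat (a b : Char) : a = b ↔ a.toNat = b.toNat := by
  constructor
  · intro h; rw [h]
  · intro h; exact Char.ext (UInt32.toNat_inj.mp h)

theorem reacts_uniq {a b c : Char} (h1 : Reacts a b) (h2 : Reacts c b) : a = c := by
  obtain ⟨e1, n1⟩ := h1
  obtain ⟨e2, n2⟩ := h2
  have h1' := congrArg Char.toNat e1
  have h2' := congrArg Char.toNat e2
  rw [upperChar_toNat, upperChar_toNat] at h1' h2'
  simp only [ne_eq, char_eq_iff_toNat] at n1 n2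
  rw [char_eq_iff_toNat]
  split_ifs at h1' h2' <;> omega

-- no two adjacent units react
def Irred : List Char → Prop
  | a :: b :: t => ¬ Reacts a b ∧ Irred (b :: t)
  | _ => True

theorem cond_iff_reacts (a b : Char) :
    (a != b && (PySem.Chars.upperChar a == PySem.Chars.upperChar b)) = true ↔ Reacts a b := by
  simp [Reacts, and_comm]

theorem irred_tail {a : Char} {t : List Char} (h : Irred (a :: t)) : Irred t := by
  cases t with
  | nil => trivial
  | cons b t' => exact h.2

theorem irred_reactStep {st : List Char} (h : Irred st) (ch : Char) :
    Irred (reactStep st ch) := by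
  cases st with
  | nil => simp [reactStep, Irred]
  | cons t r =>
    by_cases hc : Reacts ch t
    · simp only [reactStep, (cond_iff_reacts ch t).mpr hc, if_pos]
      exact irred_tail h
    · rw [reactStep, if_neg (by rw [cond_iff_reacts]; exact hc)]
      exact ⟨hc, h⟩

theorem irred_foldl {st : List Char} (h : Irred st) (s : List Char) :
    Irred (s.foldl reactStep st) := by
  induction s generalizing st with
  | nil => exact h
  | cons a t ih => exact ih (irred_reactStep h a)

theorem cancel {st : List Char} (hst : Irred st) {x y : Char} (hxy : Reacts x y)
    (v : List Char) :
    List.foldl reactStep st (x :: y :: v) = List.foldl reactStep st v := by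
  cases st with
  | nil =>
    have : reactStep (reactStep [] x) y = [] := by
      simp only [reactStep, (cond_iff_reacts y x).mpr (reacts_symm hxy), if_pos]
    simp only [List.foldl_cons, this]
  | cons t r =>
    by_cases hxt : Reacts x t
    · have hty : t = y := reacts_uniq (reacts_symm hxt) (reacts_symm hxy)
      have s1 : reactStep (t :: r) x = r := by
        simp only [reactStep, (cond_iff_reacts x t).mpr hxt, if_pos]
      cases r with
      | nil =>
        have s2 : reactStep [] y = [y] := rfl
        rw [List.foldl_cons, List.foldl_cons, s1, s2, hty]
      | cons u r' =>
        have hnu : ¬ Reacts y u := by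
          have h' := hst.1; rw [hty] at h'; exact h'
        have s2 : reactStep (u :: r') y = y :: u :: r' := by
          rw [reactStep, if_neg (by rw [cond_iff_reacts]; exact hnu)]
        rw [List.foldl_cons, List.foldl_cons, s1, s2, hty]
    · have s1 : reactStep (t :: r) x = x :: t :: r := by
        rw [reactStep, if_neg (by rw [cond_iff_reacts]; exact hxt)]
      have s2 : reactStep (x :: t :: r) y = t :: r := by
        simp only [reactStep, (cond_iff_reacts y x).mpr (reacts_symm hxy), if_pos]
      simp only [List.foldl_cons, s1, s2]

theorem removal (u : List Char) {x y : Char} (hxy : Reacts x y) (v : List Char) :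
    List.foldl reactStep [] (u ++ x :: y :: v) = List.foldl reactStep [] (u ++ v) := by
  rw [List.foldl_append, List.foldl_append]
  exact cancel (irred_foldl (by trivial) u) hxy v

theorem foldl_of_irred (s : List Char) (hs : Irred s) (st : List Char)
    (hconn : ∀ a b, s.head? = some a → st.head? = some b → ¬ Reacts a b) :
    List.foldl reactStep st s = s.reverse ++ st := by
  induction s generalizing st with
  | nil => simp
  | cons a t ih =>
    have hstep : reactStep st a = a :: st := by
      cases st with
      | nil => rfl
      | cons b r =>
        rw [reactStep, if_neg]
        rw [cond_iff_reacts]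
        exact hconn a b rfl rfl
    rw [List.foldl_cons, hstep, ih (irred_tail hs)]
    · simp
    · intro p q hp hq
      cases t with
      | nil => simp at hp
      | cons c t' =>
        simp only [List.head?_cons, Option.some_inj] at hp hq
        subst hp; subst hq
        intro hr; exact hs.1 (reacts_symm hr)

theorem irred_of_getD : ∀ (s : List Char),
    (∀ j, j + 1 < s.length → ¬ Reacts (s.getD j ' ') (s.getD (j + 1) ' ')) →
    Irred s := by
  intro s
  induction s with
  | nil => intro _; trivial
  | cons a t ih =>
    intro h
    cases t with
    | nil => trivial
    | cons b t' =>
      refine ⟨h 0 (by simp), ih ?_⟩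
      intro j hj
      have := h (j + 1) (by simpa using Nat.succ_lt_succ hj)
      simpa using this

theorem replace1_spec (sub : List Char) (hne : sub ≠ []) :
    ∀ (s : List Char) (i : Nat), sub <+: s.drop i → (∀ j, j < i → ¬ sub <+: s.drop j) →
      replace1 sub s = s.take i ++ s.drop (i + sub.length) := by
  intro s
  induction s with
  | nil =>
    intro i hp _
    simp only [List.drop_nil] at hp
    exact absurd (List.prefix_nil.mp hp) hne
  | cons a t ih =>
    intro i hp hmin
    cases i with
    | zero =>
      simp only [List.drop] at hp
      rw [replace1, if_pos (List.isPrefixOf_iff_prefix.mpr hp)]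
      simp
    | succ i' =>
      have h0 : ¬ sub <+: (a :: t) := by simpa using hmin 0 (Nat.succ_pos i')
      rw [replace1, if_neg (fun hc => h0 (List.isPrefixOf_iff_prefix.mp hc))]
      have hp' : sub <+: t.drop i' := by simpa using hp
      have hmin' : ∀ j, j < i' → ¬ sub <+: t.drop j := by
        intro j hj
        simpa using hmin (j + 1) (Nat.succ_lt_succ hj)
      rw [ih i' hp' hmin']
      simp [List.take_succ_cons, List.drop_succ_cons, Nat.succ_add]

theorem getD_take_append (s r : List Char) (i j : Nat) (hj : j < i) (hi : i ≤ s.length) :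
    (s.take i ++ r).getD j ' ' = s.getD j ' ' := by
  have hjt : j < (s.take i).length := by simp [List.length_take]; omega
  have hjs : j < s.length := by omega
  rw [List.getD_eq_getElem _ ' ' (by simp [List.length_append]; omega),
      List.getD_eq_getElem _ ' ' hjs,
      List.getElem_append_left hjt, List.getElem_take]

theorem cond_true_reacts {a b : Char}
    (h : (PySem.Chars.upperChar a == PySem.Chars.upperChar b && a != b) = true) :
    Reacts a b := by
  rw [Reacts]
  simpa using h

theorem loop_eq : ∀ (s : List Char) (i : Nat),
    (∀ j, j + 1 ≤ i → j + 1 < s.length →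
      ¬ Reacts (s.getD j ' ') (s.getD (j + 1) ' ')) →
    partOneLoop s i = (List.foldl reactStep [] s).length := by
  intro s i
  induction s, i using partOneLoop.induct with
  | case1 s i h hc ih =>
    intro hinv
    have hr : Reacts (s.getD i ' ') (s.getD (i + 1) ' ') := cond_true_reacts hc
    have hpref : [s.getD i ' ', s.getD (i + 1) ' '] <+: s.drop i :=
      ⟨s.drop (i + 2), (drop_decomp s i h).symm⟩
    have hmin : ∀ j, j < i → ¬ [s.getD i ' ', s.getD (i + 1) ' '] <+: s.drop j := by
      intro j hj hpj
      obtain ⟨rest, hrest⟩ := hpj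
      have hlen : j + 1 < s.length := by
        have := congrArg List.length hrest
        simp only [List.length_drop, List.length_append, List.length_cons] at this
        omega
      rw [drop_decomp s j hlen] at hrest
      injection hrest with h1 h2
      injection h2 with h2 _
      exact hinv j (by omega) hlen (by rw [← h1, ← h2]; exact hr)
    have hrepl := replace1_spec [s.getD i ' ', s.getD (i + 1) ' '] (by simp) s i hpref hmin
    have hlen2 : i + [s.getD i ' ', s.getD (i + 1) ' '].length = i + 2 := by simp
    rw [hlen2] at hrepl
    have hsdec : s = s.take i ++ s.getD i ' ' :: s.getD (i + 1) ' ' :: s.drop (i + 2) := by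
      conv_lhs => rw [← List.take_append_drop i s]
      rw [drop_decomp s i h]
    have hreact : List.foldl reactStep [] (s.take i ++ s.drop (i + 2))
        = List.foldl reactStep [] s := by
      conv_rhs => rw [hsdec]
      exact (removal _ hr _).symm
    rw [partOneLoop, dif_pos h, if_pos hc, ih ?_, hrepl, hreact]
    intro j hj hjl
    have hi1 : 1 ≤ i := by omega
    have hgd1 : (replace1 [s.getD i ' ', s.getD (i + 1) ' '] s).getD j ' ' = s.getD j ' ' := by
      rw [hrepl]; exact getD_take_append s _ i j (by omega) (by omega)
    have hgd2 : (replace1 [s.getD i ' ', s.getD (i + 1) ' '] s).getD (j + 1) ' '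
        = s.getD (j + 1) ' ' := by
      rw [hrepl]; exact getD_take_append s _ i (j + 1) (by omega) (by omega)
    rw [hgd1, hgd2]
    exact hinv j (by omega) (by omega)
  | case2 s i h hc ih =>
    intro hinv
    rw [partOneLoop, dif_pos h, if_neg hc]
    apply ih
    intro j hj hjl
    rcases Nat.lt_or_ge (j + 1) (i + 1) with hlt | hge
    · exact hinv j (by omega) hjl
    · have hji : j = i := by omega
      subst hji
      intro hr
      rw [Reacts] at hr
      exact hc (by simp only [Bool.and_eq_true, beq_iff_eq, bne_iff_ne, ne_eq]; exact ⟨hr.1, hr.2⟩)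
  | case3 s i h =>
    intro hinv
    rw [partOneLoop, dif_neg h]
    have hirr : Irred s := irred_of_getD s (fun j hjl => hinv j (by omega) hjl)
    rw [foldl_of_irred s hirr [] (by intro a b _ hb; simp at hb)]
    simp

theorem replace_go_single (c : Char) :
    ∀ (fuel : Nat) (l acc : List Char), l.length ≤ fuel →
      PySem.Chars.replace.go [c] [] fuel l acc
        = acc.reverse ++ l.filter (fun x => x != c) := by
  intro fuel
  induction fuel with
  | zero =>
    intro l acc hl
    have : l = [] := List.length_eq_zero_iff.mp (Nat.le_zero.mp hl)
    subst this
    simp [PySem.Chars.replace.go]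
  | succ f ih =>
    intro l acc hl
    cases l with
    | nil => simp [PySem.Chars.replace.go]
    | cons h t =>
      rw [PySem.Chars.replace.go]
      by_cases hc : c = h
      · subst hc
        rw [if_pos (by simp [List.isPrefixOf])]
        simp only [List.length_cons, List.length_nil, List.drop_succ_cons, List.drop_zero,
          List.reverse_nil, List.nil_append]
        rw [ih t acc (by simpa using hl)]
        simp
      · rw [if_neg (by simp [List.isPrefixOf, hc])]
        rw [ih t (h :: acc) (by simpa using hl)]
        simp [bne, Ne.symm hc]

theorem replace_single (s : List Char) (c : Char) :
    PySem.Chars.replace s [c] [] = s.filter (fun x => x != c) := by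
  rw [PySem.Chars.replace]
  rw [if_neg (by simp)]
  simpa using replace_go_single c s.length s [] le_rfl

theorem stripped_eq (polymer : String) (c : Char) :
    (PySem.Str.replace (PySem.Str.replace polymer (String.ofList [c]) "")
        (PySem.Str.upper (String.ofList [c])) "").toList
      = polymer.toList.filter (fun ch => ch != c && ch != PySem.Chars.upperChar c) := by
  have h1 : (PySem.Str.upper (String.ofList [c])).toList = [PySem.Chars.upperChar c] := by
    simp [PySem.Str.toList_upper, PySem.Chars.upper]
  rw [PySem.Str.toList_replace, h1, PySem.Str.toList_replace]
  simp only [String.toList_ofList, String.toList_empty]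
  rw [replace_single, replace_single, List.filter_filter]
  apply List.filter_congr
  intro x _
  simp [Bool.and_comm]

theorem part_one_eq (s : String) : part_one s = (reactLen s.toList : Int) := by
  have := loop_eq s.toList 0 (by intro j hj; omega)
  simp [part_one, reactLen, this]

theorem main_eq (polymer : String) : part_two polymer = part_two_alt polymer := by
  rw [part_two, part_two_alt]
  have hrange : PySem.List.pyRange 97 122 1
      = [97, 98, 99, 100, 101, 102, 103, 104, 105, 106, 107, 108, 109, 110, 111, 112,
         113, 114, 115, 116, 117, 118, 119, 120, 121] := by decide
  have hletters : ("abcdefghijklmnopqrstuvwxy".toList)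
      = List.map (fun c : Int => Char.ofNat c.toNat)
        [97, 98, 99, 100, 101, 102, 103, 104, 105, 106, 107, 108, 109, 110, 111, 112,
         113, 114, 115, 116, 117, 118, 119, 120, 121] := by decide
  rw [hrange, hletters, List.foldl_map]
  congr 1
  funext m c
  have hbody : part_one
      (PySem.Str.replace (PySem.Str.replace polymer (String.ofList [Char.ofNat c.toNat]) "")
        (PySem.Str.upper (String.ofList [Char.ofNat c.toNat])) "")
      = (reactLen (polymer.toList.filter
          (fun ch => ch != Char.ofNat c.toNat
            && ch != PySem.Chars.upperChar (Char.ofNat c.toNat))) : Int) := by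
    rw [part_one_eq, stripped_eq]
  simp only [hbody]
  rw [min_def]
  split_ifs <;> omega

-- ===== VERDICT (by name: the statement is the Claim_ definition above) =====
theorem part_two_spec : Claim_equal_part_two := by
  intro polymer _
  unfold Spec_part_two
  exact main_eq polymer
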